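-- pv_equiv track=rewrite | github.com/i300/AdventOfCode | 2020/six/solution.py | countAllYesAnswers
-- ===== SOURCE A (Python) =====
-- def countAllYesAnswers(groups):
--     numGroups = len([group for group in groups.split(',') if group])
--     answers = dict()
--     for answer in groups.replace(',', ''):
--         if answer in answers:
--             answers[answer] += 1
--         else:
--             answers[answer] = 1
--
--     return len([value for key,value in answers.items() if value == numGroups])
-- ===== SOURCE B (Python) =====
-- def countAllYesAnswers(groups):
--     numGroups = len([group for group in groups.split(',') if group])
--     chars = sorted(groups.replace(',', ''))
--     total = 0
--     i = 0
--     while i < len(chars):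
--         j = i
--         while j < len(chars) and chars[j] == chars[i]:
--             j += 1
--         if j - i == numGroups:
--             total += 1
--         i = j
--     return total
-- ===== Notes on version B (the rewrite author's own statement) =====
-- stated objective: alternative
-- what changed: Replaces the hash-histogram (dict of per-character counts, then a threshold filter over items) by sorting the comma-stripped characters and doing one run-length scan over the sorted list, counting runs whose length equals the number of nonempty groups.
import Mathlib
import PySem

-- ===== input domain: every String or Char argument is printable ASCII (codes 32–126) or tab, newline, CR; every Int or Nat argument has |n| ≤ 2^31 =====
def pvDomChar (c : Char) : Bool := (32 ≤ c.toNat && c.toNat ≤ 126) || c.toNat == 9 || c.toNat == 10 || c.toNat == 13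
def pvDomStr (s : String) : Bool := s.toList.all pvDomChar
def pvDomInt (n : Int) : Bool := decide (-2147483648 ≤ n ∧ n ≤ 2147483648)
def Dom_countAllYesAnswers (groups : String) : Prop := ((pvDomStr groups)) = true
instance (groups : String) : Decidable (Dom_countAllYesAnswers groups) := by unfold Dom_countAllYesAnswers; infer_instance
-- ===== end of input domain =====

-- B replaces A's dict histogram + threshold filter by sorting the comma-stripped characters
-- and counting runs (run-length scan) whose length equals the nonempty-group count (objective: alternative).


-- ===== PORT A =====
def countAllYesAnswers (groups : String) : Int :=
  -- numGroups = len([group for group in groups.split(',') if group])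
  let numGroups : Int :=
    (((PySem.Str.split? groups ",").getD []).filter (fun g => !(g == ""))).length
  -- for answer in groups.replace(',', ''): if answer in answers: answers[answer] += 1 else: answers[answer] = 1
  let answers : PySem.Dict Char Int :=
    ((PySem.Str.replace groups "," "").toList).foldl
      (fun d a => if d.contains a then d.modify a 0 (· + 1) else d.insert a 1)
      PySem.Dict.empty
  -- len([value for key, value in answers.items() if value == numGroups])
  ((answers.items.filter (fun kv => kv.2 == numGroups)).length : Int)

-- ===== PORT B =====
-- the outer while loop of Source B: one step per run of equal characters in the sorted list;
-- the inner while (j advancing over equal chars) is the takeWhile, i = j is the dropWhile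
def runScan (n : Int) : List Char → Int
  | [] => 0
  | x :: xs =>
      (if (((x :: xs).takeWhile (fun c => c == x)).length : Int) = n then 1 else 0)
        + runScan n ((x :: xs).dropWhile (fun c => c == x))
termination_by l => l.length
decreasing_by
  simp only [List.dropWhile_cons, beq_self_eq_true, if_true]
  have := List.length_dropWhile_le (fun c => c == x) xs
  simp only [List.length_cons]
  omega

def countAllYesAnswers_alt (groups : String) : Int :=
  let numGroups : Int :=
    (((PySem.Str.split? groups ",").getD []).filter (fun g => !(g == ""))).length
  let chars := PySem.List.sorted ((PySem.Str.replace groups "," "").toList) (fun c => c) false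
  runScan numGroups chars

-- ===== PRECONDITION & SPEC =====
def Spec_countAllYesAnswers (groups : String) (out : Int) : Prop := out = countAllYesAnswers_alt groups
instance (groups : String) (out : Int) : Decidable (Spec_countAllYesAnswers groups out) := by unfold Spec_countAllYesAnswers; infer_instance

-- ===== CLAIM (what is proved, stated in full; the proofs are below) =====
def Claim_equal_countAllYesAnswers : Prop := ∀ (groups : String), Dom_countAllYesAnswers groups → Spec_countAllYesAnswers groups (countAllYesAnswers groups)

-- ===== LEMMAS AND PROOFS =====

-- A's counting loop is Counter(t)
theorem foldl_eq_counter (t : List Char) :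
    t.foldl (fun d a => if d.contains a then d.modify a 0 (· + 1) else d.insert a 1)
      PySem.Dict.empty = PySem.Dict.counter t := by
  have hstep : (fun (d : PySem.Dict Char Int) a =>
      if d.contains a then d.modify a 0 (· + 1) else d.insert a 1)
      = fun d a => d.modify a 0 (· + 1) := by
    funext d a
    by_cases h : d.contains a
    · simp [h]
    · simp only [Bool.not_eq_true] at h
      simp only [h, Bool.false_eq_true, if_false, PySem.Dict.modify,
        PySem.Dict.getD_of_not_contains d 0 h]
      norm_num
  rw [hstep, PySem.Dict.counter_eq_foldl]

-- run-length scan of a sorted list counts the distinct characters whose multiplicity is n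
theorem runScan_sorted (n : Int) (l : List Char) (h : l.Pairwise (· ≤ ·)) :
    runScan n l
      = (((PySem.Set.ofList l).filter (fun c => (l.count c : Int) == n)).length : Int) := by
  revert h
  induction l using runScan.induct with
  | case1 => intro _; simp [runScan, PySem.Set.ofList_nil]
  | case2 x xs ih =>
    intro h
    have hsplit : (x :: xs).takeWhile (fun c => c == x) ++ (x :: xs).dropWhile (fun c => c == x)
        = x :: xs := List.takeWhile_append_dropWhile
    set run := (x :: xs).takeWhile (fun c => c == x) with hrun
    set rest := (x :: xs).dropWhile (fun c => c == x) with hrest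
    have hrunx : ∀ c ∈ run, c = x := by
      intro c hc
      have := List.mem_takeWhile_imp hc
      simpa using this
    have hxrun : x ∈ run := by
      rw [hrun]
      simp
    have hrest_sorted : rest.Pairwise (· ≤ ·) :=
      h.sublist (List.dropWhile_suffix _).sublist
    have hsub : rest <:+ x :: xs := List.dropWhile_suffix _
    have hxnotin : x ∉ rest := by
      intro hx
      have hne : rest ≠ [] := by intro e; rw [e] at hx; simp at hx
      have hyhead := List.head_dropWhile_not (fun c => c == x) hne
      set y := rest.head hne with hy
      have hyx : y ≠ x := by simpa using hyhead
      have hycons : rest = y :: rest.tail := by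
        exact (List.cons_head_tail hne).symm
      have hymem : y ∈ x :: xs := hsub.subset (by rw [hycons]; simp)
      have hyxs : y ∈ xs := by
        rcases List.mem_cons.mp hymem with e | e
        · exact absurd e hyx
        · exact e
      have hxy : x ≤ y := (List.pairwise_cons.mp h).1 y hyxs
      have hyx' : y ≤ x := by
        rw [hycons] at hrest_sorted hx
        rcases List.mem_cons.mp hx with e | e
        · exact le_of_eq e.symm
        · exact (List.pairwise_cons.mp hrest_sorted).1 x e
      exact hyx (le_antisymm hyx' hxy)
    have hcountx : (x :: xs).count x = run.length := by
      rw [← hsplit, List.count_append]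
      have h1 : run.count x = run.length :=
        List.count_eq_length.mpr (fun b hb => (hrunx b hb).symm)
      have h2 : rest.count x = 0 := List.count_eq_zero.mpr hxnotin
      omega
    have hcount_rest : ∀ c ∈ rest, rest.count c = (x :: xs).count c := by
      intro c hc
      have hcx : c ≠ x := fun e => hxnotin (e ▸ hc)
      rw [← hsplit, List.count_append]
      have h0 : run.count c = 0 :=
        List.count_eq_zero.mpr (fun hcr => hcx (hrunx c hcr))
      omega
    have hmem : ∀ a, a ∈ x :: xs ↔ a = x ∨ a ∈ rest := by
      intro a
      constructor
      · intro ha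
        rw [← hsplit] at ha
        rcases List.mem_append.mp ha with h1 | h1
        · exact Or.inl (hrunx a h1)
        · exact Or.inr h1
      · intro ha
        rcases ha with e | e
        · subst e; exact List.mem_cons_self
        · exact hsub.subset e
    have hperm : (PySem.Set.ofList (x :: xs)).Perm (x :: PySem.Set.ofList rest) := by
      refine (List.perm_ext_iff_of_nodup (PySem.Set.nodup_ofList _) ?_).mpr ?_
      · exact List.nodup_cons.mpr
          ⟨by simpa [PySem.Set.mem_ofList] using hxnotin, PySem.Set.nodup_ofList _⟩
      · intro a
        simp only [PySem.Set.mem_ofList, List.mem_cons, hmem]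
    have hlen : ((PySem.Set.ofList (x :: xs)).filter
          (fun c => ((x :: xs).count c : Int) == n)).length
        = ((x :: PySem.Set.ofList rest).filter
          (fun c => ((x :: xs).count c : Int) == n)).length :=
      (hperm.filter _).length_eq
    have hfc : (PySem.Set.ofList rest).filter (fun c => ((x :: xs).count c : Int) == n)
        = (PySem.Set.ofList rest).filter (fun c => (rest.count c : Int) == n) := by
      refine List.filter_congr ?_
      intro c hc
      rw [hcount_rest c ((PySem.Set.mem_ofList _ _).mp hc)]
    have hcond : (((x :: xs).count x : Int) == n) = (((run.length : Nat) : Int) == n) := by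
      rw [hcountx]
    rw [runScan, ih hrest_sorted, hlen, List.filter_cons]
    rw [hfc, hcond, ← hrun]
    by_cases hn : ((run.length : Nat) : Int) = n
    · rw [if_pos hn, if_pos (by simpa using hn)]
      simp only [List.length_cons]
      push_cast
      omega
    · rw [if_neg hn, if_neg (by simpa using hn)]
      omega

theorem counter_filter_eq_runScan (t : List Char) (n : Int) :
    (((PySem.Dict.counter t).items.filter (fun kv => kv.2 == n)).length : Int)
      = runScan n (PySem.List.sorted t (fun c => c) false) := by
  have hs : (PySem.List.sorted t (fun c => c) false).Pairwise (· ≤ ·) :=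
    PySem.List.sorted_pairwise t (fun c => c)
  have hp : (PySem.List.sorted t (fun c => c) false).Perm t :=
    PySem.List.sorted_perm t (fun c => c) false
  rw [runScan_sorted n _ hs, PySem.Dict.items_counter, List.filter_map, List.length_map]
  have hpred : (fun c => ((PySem.List.sorted t (fun c => c) false).count c : Int) == n)
      = fun c => ((t.count c : Int) == n) := by
    funext c
    rw [hp.count_eq]
  rw [hpred]
  have hperm : (PySem.Set.ofList t).Perm
      (PySem.Set.ofList (PySem.List.sorted t (fun c => c) false)) := by
    refine (List.perm_ext_iff_of_nodup (PySem.Set.nodup_ofList _)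
      (PySem.Set.nodup_ofList _)).mpr ?_
    intro a
    simp only [PySem.Set.mem_ofList, hp.mem_iff]
  have := (hperm.filter (fun c => ((t.count c : Int) == n))).length_eq
  rw [← this]
  congr 1

-- ===== VERDICT (by name: the statement is the Claim_ definition above) =====
theorem countAllYesAnswers_spec : Claim_equal_countAllYesAnswers := by
  intro groups _
  unfold Spec_countAllYesAnswers countAllYesAnswers countAllYesAnswers_alt
  simp only [foldl_eq_counter]
  exact counter_filter_eq_runScan _ _
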